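-- pv_equiv track=rewrite | github.com/hernowork/netsec-scanner | scan_manager.py | merge_ports
-- ===== SOURCE A (Python) =====
-- def merge_ports(defaults_csv, manual_csv):
--     """Merge comma-separated port strings into a de-duplicated, sorted CSV."""
--     def norm(s):
--         return [x.strip() for x in (s or "").split(",") if x.strip()]
--     a = set(norm(defaults_csv))
--     b = set(norm(manual_csv))
--     def sort_key(x):
--         return (not x.isdigit(), int(x) if x.isdigit() else x)
--     merged = sorted(a.union(b), key=sort_key)
--     return ",".join(merged)
-- ===== SOURCE B (Python) =====
-- def merge_ports(defaults_csv, manual_csv):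
--     """Merge comma-separated port strings into a de-duplicated, sorted CSV."""
--     def key(t):
--         return (0, int(t), "") if t.isdigit() else (1, 0, t)
--     def insert(lst, t):
--         k = key(t)
--         for i, h in enumerate(lst):
--             if t == h:
--                 return lst
--             if k < key(h):
--                 return lst[:i] + [t] + lst[i:]
--         return lst + [t]
--     out = []
--     for csv in (defaults_csv, manual_csv):
--         for raw in (csv or "").split(","):
--             t = raw.strip()
--             if t:
--                 out = insert(out, t)
--     return ",".join(out)
-- ===== Notes on version B (the rewrite author's own statement) =====
-- stated objective: alternative
-- what changed: A collects tokens into two sets, unions them and calls sorted with a composite (not isdigit, int-or-str) key; B never builds a set or calls sort: it makes one pass over the parsed tokens, inserting each into an incrementally maintained sorted list at its order position (insertion sort), with duplicates dropped during the same scan.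
-- outside the precondition, e.g. on merge_ports('007,7', None): A returns '7,007', B returns '007,7'; on merge_ports('0,00,000', None): A returns '00,000,0', B returns '0,00,000'
import Mathlib
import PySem

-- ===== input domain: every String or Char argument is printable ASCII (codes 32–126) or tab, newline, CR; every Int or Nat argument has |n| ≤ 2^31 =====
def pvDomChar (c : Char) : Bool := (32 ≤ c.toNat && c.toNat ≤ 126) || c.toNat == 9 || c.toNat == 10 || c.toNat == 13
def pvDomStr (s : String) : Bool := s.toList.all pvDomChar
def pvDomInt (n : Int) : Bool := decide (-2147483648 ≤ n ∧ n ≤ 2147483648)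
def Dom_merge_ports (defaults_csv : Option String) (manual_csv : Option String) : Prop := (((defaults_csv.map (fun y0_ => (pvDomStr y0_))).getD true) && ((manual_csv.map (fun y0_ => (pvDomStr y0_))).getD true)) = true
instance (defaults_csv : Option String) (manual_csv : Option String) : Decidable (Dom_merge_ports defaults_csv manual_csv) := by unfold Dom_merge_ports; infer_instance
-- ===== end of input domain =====

-- B replaces A's set-union-then-sort by one incremental pass that inserts each parsed token into
-- a sorted dedup list at its order position (insertion sort with dedup): alternative algorithm, same result.


-- ===== PORT A =====
-- norm(s) = [x.strip() for x in (s or "").split(",") if x.strip()]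
def pvNormA (s : Option String) : List String :=
  (((PySem.Str.split? (s.getD "") ",").getD []).map PySem.Str.strip).filter (fun x => x ≠ "")

-- sort_key(x) = (not x.isdigit(), int(x) if x.isdigit() else x); the Python tuple compares
-- lexicographically, which is exactly the Lex product / Lex sum order (int(x) never raises on a digit
-- string, so the getD 0 default is unreachable)
def pvKeyA (x : String) : Lex (Bool × Lex (Int ⊕ String)) :=
  toLex (!PySem.Str.strIsdigit x,
    toLex (if PySem.Str.strIsdigit x then Sum.inl ((PySem.Int.ofStr? x).getD 0) else Sum.inr x))

def merge_ports (defaults_csv : Option String) (manual_csv : Option String) : String :=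
  let a : PySem.Set String := PySem.Set.ofList (pvNormA defaults_csv)
  let b : PySem.Set String := PySem.Set.ofList (pvNormA manual_csv)
  let merged := PySem.List.sorted (PySem.Set.union a b) pvKeyA false
  PySem.Str.join "," merged

-- ===== PORT B =====
-- key(t) = (0, int(t), "") if t.isdigit() else (1, 0, t)
def pvKeyB (t : String) : Int × Int × String :=
  if PySem.Str.strIsdigit t
  then ((0 : Int), (PySem.Int.ofStr? t).getD 0, "")
  else ((1 : Int), 0, t)

-- Python's `<` on the 3-tuples pvKeyB returns, spelled out lexicographically (exact:
-- both int and string components compare as in Python)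
def pvTupLt (a b : Int × Int × String) : Bool :=
  a.1 < b.1 || (a.1 == b.1 && (a.2.1 < b.2.1 || (a.2.1 == b.2.1 && a.2.2 < b.2.2)))

-- insert(lst, t): scan the sorted list; drop t if already present, place it before the first
-- larger-keyed element, else append at the end (the for/enumerate loop as structural recursion)
def pvInsertB (lst : List String) (t : String) : List String :=
  match lst with
  | [] => [t]
  | h :: rest =>
    if t = h then h :: rest
    else if pvTupLt (pvKeyB t) (pvKeyB h) then t :: h :: rest
    else h :: pvInsertB rest t

def merge_ports_alt (defaults_csv : Option String) (manual_csv : Option String) : String :=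
  let out := [defaults_csv, manual_csv].foldl
    (fun out csv => ((PySem.Str.split? (csv.getD "") ",").getD []).foldl
      (fun out raw =>
        let t := PySem.Str.strip raw
        if t ≠ "" then pvInsertB out t else out) out)
    []
  PySem.Str.join "," out

-- ===== PRECONDITION & SPEC =====
-- Pre_ excludes inputs carrying two distinct digit tokens with the same int value (e.g. '7' and '007'):
-- there A's sort ties under its key and orders them by Python's hash-randomized set-iteration order,
-- which is accidental and not deterministically matchable.
def Pre_merge_ports (defaults_csv : Option String) (manual_csv : Option String) : Prop :=
  ∀ x ∈ pvNormA defaults_csv ++ pvNormA manual_csv,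
    ∀ y ∈ pvNormA defaults_csv ++ pvNormA manual_csv,
      PySem.Str.strIsdigit x = true → PySem.Str.strIsdigit y = true →
      (PySem.Int.ofStr? x).getD 0 = (PySem.Int.ofStr? y).getD 0 → x = y

instance (defaults_csv : Option String) (manual_csv : Option String) :
    Decidable (Pre_merge_ports defaults_csv manual_csv) := by
  unfold Pre_merge_ports; infer_instance

def pvWitness_merge_ports : Option String × Option String := (some "80,443,ssh", some "22, 443")

def Spec_merge_ports (defaults_csv : Option String) (manual_csv : Option String) (out : String) : Prop := out = merge_ports_alt defaults_csv manual_csv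
instance (defaults_csv : Option String) (manual_csv : Option String) (out : String) : Decidable (Spec_merge_ports defaults_csv manual_csv out) := by unfold Spec_merge_ports; infer_instance

-- ===== CLAIM (what is proved, stated in full; the proofs are below) =====
def Claim_equal_merge_ports : Prop := ∀ (defaults_csv : Option String) (manual_csv : Option String), Dom_merge_ports defaults_csv manual_csv → Pre_merge_ports defaults_csv manual_csv → Spec_merge_ports defaults_csv manual_csv (merge_ports defaults_csv manual_csv)

-- ===== LEMMAS AND PROOFS =====

-- closed forms of the two keys on digit / non-digit tokens
theorem pvKeyA_eq_num (a : String) (ha : PySem.Str.strIsdigit a = true) :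
    pvKeyA a = toLex (false, toLex (Sum.inl ((PySem.Int.ofStr? a).getD 0))) := by
  unfold pvKeyA; rw [ha]; simp

theorem pvKeyA_eq_txt (a : String) (ha : PySem.Str.strIsdigit a = false) :
    pvKeyA a = toLex (true, toLex (Sum.inr a)) := by
  unfold pvKeyA; rw [ha]; simp

-- proof-side view of B's key as a lexicographic order
def pvKeyBL (t : String) : Lex (Int × Lex (Int × String)) :=
  toLex ((pvKeyB t).1, toLex ((pvKeyB t).2.1, (pvKeyB t).2.2))

theorem pvTupLt_keyB_iff (a b : String) :
    pvTupLt (pvKeyB a) (pvKeyB b) = true ↔ pvKeyBL a < pvKeyBL b := by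
  unfold pvKeyBL
  rw [Prod.Lex.toLex_lt_toLex, Prod.Lex.toLex_lt_toLex]
  simp [pvTupLt]

theorem pvKeyB_eq_num (a : String) (ha : PySem.Str.strIsdigit a = true) :
    pvKeyBL a = toLex ((0 : Int), toLex (((PySem.Int.ofStr? a).getD 0), "")) := by
  unfold pvKeyBL pvKeyB; rw [ha]; simp

theorem pvKeyB_eq_txt (a : String) (ha : PySem.Str.strIsdigit a = false) :
    pvKeyBL a = toLex ((1 : Int), toLex ((0 : Int), a)) := by
  unfold pvKeyBL pvKeyB; rw [ha]; simp

-- B's key order implies A's key order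
theorem pvKeyB_lt_keyA (a b : String) (h : pvKeyBL a < pvKeyBL b) : pvKeyA a < pvKeyA b := by
  by_cases ha : PySem.Str.strIsdigit a = true <;> by_cases hb : PySem.Str.strIsdigit b = true
  · -- both digits: B gives int a < int b
    rw [pvKeyB_eq_num a ha, pvKeyB_eq_num b hb, Prod.Lex.toLex_lt_toLex] at h
    have h' : ((PySem.Int.ofStr? a).getD 0) < ((PySem.Int.ofStr? b).getD 0) := by
      rcases h with h | ⟨_, h⟩
      · omega
      · rw [Prod.Lex.toLex_lt_toLex] at h
        rcases h with h | ⟨_, h⟩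
        · exact h
        · exact absurd h (lt_irrefl _)
    rw [pvKeyA_eq_num a ha, pvKeyA_eq_num b hb, Prod.Lex.toLex_lt_toLex]
    exact Or.inr ⟨rfl, by rw [Sum.Lex.toLex_lt_toLex]; exact Sum.Lex.inl h'⟩
  · -- digit before text
    rw [pvKeyA_eq_num a ha, pvKeyA_eq_txt b (Bool.not_eq_true _ ▸ hb), Prod.Lex.toLex_lt_toLex]
    exact Or.inl (show (false : Bool) < true by decide)
  · -- text before digit: impossible in B
    exfalso
    rw [pvKeyB_eq_txt a (Bool.not_eq_true _ ▸ ha), pvKeyB_eq_num b hb,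
      Prod.Lex.toLex_lt_toLex] at h
    rcases h with h | ⟨h, _⟩ <;> omega
  · -- both text: B gives a < b
    rw [pvKeyB_eq_txt a (Bool.not_eq_true _ ▸ ha), pvKeyB_eq_txt b (Bool.not_eq_true _ ▸ hb),
      Prod.Lex.toLex_lt_toLex] at h
    have h' : a < b := by
      rcases h with h | ⟨_, h⟩
      · omega
      · rw [Prod.Lex.toLex_lt_toLex] at h
        rcases h with h | ⟨_, h⟩
        · omega
        · exact h
    rw [pvKeyA_eq_txt a (Bool.not_eq_true _ ▸ ha), pvKeyA_eq_txt b (Bool.not_eq_true _ ▸ hb),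
      Prod.Lex.toLex_lt_toLex]
    exact Or.inr ⟨rfl, by rw [Sum.Lex.toLex_lt_toLex]; exact Sum.Lex.inr h'⟩

-- equal B-keys mean equal tokens, given Pre_'s no-int-tie hypothesis on the token universe
theorem pvKeyB_inj (T0 : List String)
    (hpre : ∀ x ∈ T0, ∀ y ∈ T0, PySem.Str.strIsdigit x = true → PySem.Str.strIsdigit y = true →
      (PySem.Int.ofStr? x).getD 0 = (PySem.Int.ofStr? y).getD 0 → x = y)
    (x : String) (hx : x ∈ T0) (y : String) (hy : y ∈ T0)
    (h : pvKeyBL x = pvKeyBL y) : x = y := by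
  by_cases hdx : PySem.Str.strIsdigit x = true <;> by_cases hdy : PySem.Str.strIsdigit y = true
  · rw [pvKeyB_eq_num x hdx, pvKeyB_eq_num y hdy] at h
    simp only [toLex_inj, Prod.mk.injEq] at h
    exact hpre x hx y hy hdx hdy h.2.1
  · rw [pvKeyB_eq_num x hdx, pvKeyB_eq_txt y (Bool.not_eq_true _ ▸ hdy)] at h
    simp only [toLex_inj, Prod.mk.injEq] at h
    omega
  · rw [pvKeyB_eq_txt x (Bool.not_eq_true _ ▸ hdx), pvKeyB_eq_num y hdy] at h
    simp only [toLex_inj, Prod.mk.injEq] at h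
    omega
  · rw [pvKeyB_eq_txt x (Bool.not_eq_true _ ▸ hdx), pvKeyB_eq_txt y (Bool.not_eq_true _ ▸ hdy)] at h
    simp only [toLex_inj, Prod.mk.injEq] at h
    exact h.2.2

-- one insertion: keeps the list strictly sorted (key order pvKeyBL) and adds exactly {t} to its members
theorem pvInsertB_spec (lst : List String) (t : String)
    (hpw : lst.Pairwise (fun a b => pvKeyBL a < pvKeyBL b))
    (hinj : ∀ x ∈ lst, pvKeyBL x = pvKeyBL t → x = t) :
    (pvInsertB lst t).Pairwise (fun a b => pvKeyBL a < pvKeyBL b) ∧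
    (∀ x, x ∈ pvInsertB lst t ↔ x = t ∨ x ∈ lst) := by
  induction lst with
  | nil => simp [pvInsertB]
  | cons h rest ih =>
    by_cases heq : t = h
    · simp only [pvInsertB, if_pos heq]
      refine ⟨hpw, fun x => ⟨Or.inr, ?_⟩⟩
      rintro (rfl | hx)
      · rw [heq]; exact List.mem_cons_self
      · exact hx
    · by_cases hlt : pvKeyBL t < pvKeyBL h
      · have hlt' : pvTupLt (pvKeyB t) (pvKeyB h) = true := (pvTupLt_keyB_iff t h).mpr hlt
        simp only [pvInsertB, if_neg heq, if_pos hlt']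
        constructor
        · refine List.pairwise_cons.mpr ⟨?_, hpw⟩
          intro b hb
          rcases List.mem_cons.mp hb with rfl | hb
          · exact hlt
          · exact lt_trans hlt (List.rel_of_pairwise_cons hpw hb)
        · intro x; simp only [List.mem_cons]
      · have hne : pvKeyBL h ≠ pvKeyBL t := fun he => heq ((hinj h List.mem_cons_self he).symm)
        have hhl : pvKeyBL h < pvKeyBL t := by
          rcases lt_trichotomy (pvKeyBL t) (pvKeyBL h) with h1 | h1 | h1
          · exact absurd h1 hlt
          · exact absurd h1.symm hne
          · exact h1
        have hlt'' : ¬ (pvTupLt (pvKeyB t) (pvKeyB h) = true) :=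
          fun hc => hlt ((pvTupLt_keyB_iff t h).mp hc)
        obtain ⟨ihpw, ihmem⟩ := ih (List.pairwise_cons.mp hpw).2
          (fun x hx => hinj x (List.mem_cons_of_mem _ hx))
        simp only [pvInsertB, if_neg heq, if_neg hlt'']
        constructor
        · refine List.pairwise_cons.mpr ⟨?_, ihpw⟩
          intro b hb
          rcases (ihmem b).mp hb with rfl | hb
          · exact hhl
          · exact List.rel_of_pairwise_cons hpw hb
        · intro x
          simp only [List.mem_cons, ihmem]
          tauto

-- the whole insertion pass, by induction over the token stream
theorem pvFoldInsert_spec (T0 : List String)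
    (hinjT : ∀ x ∈ T0, ∀ y ∈ T0, pvKeyBL x = pvKeyBL y → x = y)
    (ts : List String) (lst : List String)
    (hts : ∀ x ∈ ts, x ∈ T0) (hlst : ∀ x ∈ lst, x ∈ T0)
    (hpw : lst.Pairwise (fun a b => pvKeyBL a < pvKeyBL b)) :
    (ts.foldl pvInsertB lst).Pairwise (fun a b => pvKeyBL a < pvKeyBL b) ∧
    (∀ x, x ∈ ts.foldl pvInsertB lst ↔ x ∈ lst ∨ x ∈ ts) ∧
    (∀ x ∈ ts.foldl pvInsertB lst, x ∈ T0) := by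
  induction ts generalizing lst with
  | nil => exact ⟨hpw, fun x => by simp, hlst⟩
  | cons t rest ih =>
    have htT : t ∈ T0 := hts t List.mem_cons_self
    obtain ⟨ipw, imem⟩ := pvInsertB_spec lst t hpw
      (fun x hx he => hinjT x (hlst x hx) t htT he)
    have hlst' : ∀ x ∈ pvInsertB lst t, x ∈ T0 := by
      intro x hx
      rcases (imem x).mp hx with rfl | hx
      · exact htT
      · exact hlst x hx
    obtain ⟨rpw, rmem, rT⟩ := ih (pvInsertB lst t)
      (fun x hx => hts x (List.mem_cons_of_mem _ hx)) hlst' ipw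
    refine ⟨rpw, ?_, rT⟩
    intro x
    rw [List.foldl_cons, rmem x, imem x, List.mem_cons]
    tauto

-- the inner raw-token loop is the insertion fold over the normalized token list
theorem pvInner_eq (out : List String) (s : Option String) :
    ((PySem.Str.split? (s.getD "") ",").getD []).foldl
      (fun out raw => if PySem.Str.strip raw ≠ "" then pvInsertB out (PySem.Str.strip raw) else out)
      out
    = (pvNormA s).foldl pvInsertB out := by
  unfold pvNormA
  rw [List.foldl_filter, List.foldl_map]
  congr 1
  funext acc raw
  by_cases hc : PySem.Str.strip raw = "" <;> simp [hc]

theorem merge_ports_spec : Claim_equal_merge_ports := by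
  intro d m _hdom hpre
  unfold Spec_merge_ports
  show merge_ports d m = merge_ports_alt d m
  simp only [merge_ports, merge_ports_alt, List.foldl_cons, List.foldl_nil]
  rw [pvInner_eq, pvInner_eq, ← List.foldl_append]
  set R := (pvNormA d ++ pvNormA m).foldl pvInsertB [] with hR
  have hinjT := pvKeyB_inj (pvNormA d ++ pvNormA m) hpre
  obtain ⟨rpw, rmem, _⟩ := pvFoldInsert_spec (pvNormA d ++ pvNormA m) hinjT
    (pvNormA d ++ pvNormA m) []
    (fun x hx => hx)
    (fun x hx => absurd hx (List.not_mem_nil))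
    List.Pairwise.nil
  have Rnodup : R.Nodup := by
    refine rpw.imp ?_
    intro a b hab he
    exact absurd (he ▸ hab) (lt_irrefl _)
  have Unodup : (PySem.Set.union (PySem.Set.ofList (pvNormA d))
      (PySem.Set.ofList (pvNormA m))).Nodup :=
    PySem.Set.nodup_union _ _ (PySem.Set.nodup_ofList _)
  have perm : R.Perm (PySem.Set.union (PySem.Set.ofList (pvNormA d))
      (PySem.Set.ofList (pvNormA m))) := by
    refine (List.perm_ext_iff_of_nodup Rnodup Unodup).mpr ?_
    intro x
    rw [hR, rmem x, PySem.Set.mem_union, PySem.Set.mem_ofList, PySem.Set.mem_ofList,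
      List.mem_append]
    simp
  have pwA : R.Pairwise (fun a b => pvKeyA a < pvKeyA b) :=
    rpw.imp (fun h => pvKeyB_lt_keyA _ _ h)
  rw [PySem.List.sorted_eq_of_perm_of_pairwise_lt _ R pvKeyA perm pwA]
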